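-- pv_equiv track=rewrite | github.com/ami-megarac/OSSW-LTS-v13 | Core/UnModified_OpenSource/apparmor/apparmor-2.13.2/utils/apparmor/aamode.py | split_mode
-- ===== SOURCE A (Python) =====
-- def AA_OTHER_REMOVE(mode):
--     other = set()
--     for i in mode:
--         if '::' in i:
--             other.add(i[2:])
--     return other
--
-- def split_mode(mode):
--     user = set()
--     for i in mode:
--         if not '::' in i:
--             user.add(i)
--     other = mode - user
--     other = AA_OTHER_REMOVE(other)
--     return user, other
-- ===== SOURCE B (Python) =====
-- def split_mode(mode):
--     user = set()
--     other = set()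
--     for i in mode:
--         if '::' in i:
--             other.add(i[2:])
--         else:
--             user.add(i)
--     return user, other
-- ===== Notes on version B (the rewrite author's own statement) =====
-- stated objective: simpler
-- what changed: B replaces A's three sequential steps (build user set, compute the set difference mode - user, strip prefixes in a second loop) by one single-pass partition that classifies each element into user or other directly.
import Mathlib
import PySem

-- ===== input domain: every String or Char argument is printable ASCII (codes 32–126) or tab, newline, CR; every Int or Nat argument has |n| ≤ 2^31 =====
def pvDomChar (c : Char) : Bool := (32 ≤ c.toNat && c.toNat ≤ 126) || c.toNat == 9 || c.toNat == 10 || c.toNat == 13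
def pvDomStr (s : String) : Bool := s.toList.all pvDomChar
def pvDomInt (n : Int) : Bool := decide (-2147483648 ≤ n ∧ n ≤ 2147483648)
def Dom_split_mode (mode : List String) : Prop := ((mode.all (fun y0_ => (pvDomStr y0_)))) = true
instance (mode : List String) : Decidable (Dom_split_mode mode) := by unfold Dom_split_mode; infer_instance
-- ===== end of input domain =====

-- B fuses A's three steps (user-set pass, set difference, strip pass) into one partitioning pass; objective: simpler.
-- ===== PORT A =====
def AA_OTHER_REMOVE (mode : List String) : List String :=
  mode.foldl (fun other i =>
    if PySem.Str.isIn "::" i then PySem.Set.add other (PySem.Str.slice i (some 2) none)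
    else other) PySem.Set.empty

def split_mode (mode : List String) : List String × List String :=
  let user := mode.foldl (fun user i =>
    if !(PySem.Str.isIn "::" i) then PySem.Set.add user i else user) PySem.Set.empty
  let other := PySem.Set.diff mode user
  let other := AA_OTHER_REMOVE other
  (user, other)

-- ===== PORT B =====
def split_mode_alt (mode : List String) : List String × List String :=
  mode.foldl (fun (st : List String × List String) i =>
    if PySem.Str.isIn "::" i then (st.1, PySem.Set.add st.2 (PySem.Str.slice i (some 2) none))
    else (PySem.Set.add st.1 i, st.2)) (PySem.Set.empty, PySem.Set.empty)

-- ===== PRECONDITION & SPEC =====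
def Spec_split_mode (mode : List String) (out : List String × List String) : Prop := out = split_mode_alt mode
instance (mode : List String) (out : List String × List String) : Decidable (Spec_split_mode mode out) := by unfold Spec_split_mode; infer_instance

-- ===== CLAIM (what is proved, stated in full; the proofs are below) =====
def Claim_equal_split_mode : Prop := ∀ (mode : List String), Dom_split_mode mode → Spec_split_mode mode (split_mode mode)

-- ===== LEMMAS AND PROOFS =====
theorem mem_userFold (p : String → Bool) (l acc : List String) (x : String) :
    x ∈ l.foldl (fun user i => if !(p i) then PySem.Set.add user i else user) acc
      ↔ x ∈ acc ∨ (x ∈ l ∧ p x = false) := by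
  induction l generalizing acc with
  | nil => simp
  | cons a l ih =>
    rw [List.foldl_cons]
    by_cases h : p a = true
    · rw [if_neg (by simp [h]), ih]
      constructor
      · rintro (hx | hl)
        · exact Or.inl hx
        · exact Or.inr ⟨List.mem_cons_of_mem _ hl.1, hl.2⟩
      · rintro (hx | ⟨hm, hp⟩)
        · exact Or.inl hx
        · rcases List.mem_cons.1 hm with rfl | hm'
          · rw [h] at hp; exact absurd hp (by simp)
          · exact Or.inr ⟨hm', hp⟩
    · simp only [Bool.not_eq_true] at h
      rw [if_pos (by simp [h]), ih]
      simp only [PySem.Set.mem_add, List.mem_cons]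
      constructor
      · rintro (⟨hx | rfl⟩ | hl)
        · exact Or.inl hx
        · exact Or.inr ⟨Or.inl rfl, h⟩
        · exact Or.inr ⟨Or.inr hl.1, hl.2⟩
      · rintro (hx | ⟨rfl | hm, hp⟩)
        · exact Or.inl (Or.inl hx)
        · exact Or.inl (Or.inr rfl)
        · exact Or.inr ⟨hm, hp⟩

theorem AAfold_filter (p : String → Bool) (g : String → String) (l acc : List String) :
    (l.filter p).foldl (fun other i => if p i then PySem.Set.add other (g i) else other) acc
      = l.foldl (fun other i => if p i then PySem.Set.add other (g i) else other) acc := by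
  induction l generalizing acc with
  | nil => rfl
  | cons a l ih =>
    by_cases h : p a = true
    · rw [List.filter_cons, if_pos h, List.foldl_cons, List.foldl_cons, if_pos h]
      exact ih _
    · rw [List.filter_cons, if_neg h, List.foldl_cons, if_neg h]
      exact ih _

theorem pairFold (p : String → Bool) (g : String → String) (l : List String)
    (u o : List String) :
    l.foldl (fun (st : List String × List String) i =>
        if p i then (st.1, PySem.Set.add st.2 (g i))
        else (PySem.Set.add st.1 i, st.2)) (u, o)
      = (l.foldl (fun user i => if !(p i) then PySem.Set.add user i else user) u,
         l.foldl (fun other i => if p i then PySem.Set.add other (g i) else other) o) := by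
  induction l generalizing u o with
  | nil => rfl
  | cons a l ih =>
    simp only [List.foldl_cons]
    by_cases h : p a = true
    · rw [if_pos h, if_pos h, if_neg (by simp [h])]
      exact ih _ _
    · rw [if_neg h, if_neg h, if_pos (by simp [h])]
      exact ih _ _

theorem diff_eq_filter (p : String → Bool) (mode : List String) :
    PySem.Set.diff mode
        (mode.foldl (fun user i => if !(p i) then PySem.Set.add user i else user)
          PySem.Set.empty)
      = mode.filter p := by
  unfold PySem.Set.diff
  apply List.filter_congr
  intro x hx
  dsimp only
  have hmem := mem_userFold p mode PySem.Set.empty x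
  cases h : p x with
  | true =>
    have hnot : x ∉ mode.foldl
        (fun user i => if !(p i) then PySem.Set.add user i else user) PySem.Set.empty := by
      intro hm
      rcases hmem.1 hm with h1 | ⟨_, h2⟩
      · simp [PySem.Set.empty] at h1
      · rw [h] at h2
        exact absurd h2 (by simp)
    simp only [Bool.not_eq_true', PySem.Set.empty] at hnot
    simp [hnot]
  | false =>
    have hin : x ∈ mode.foldl
        (fun user i => if !(p i) then PySem.Set.add user i else user) PySem.Set.empty :=
      hmem.2 (Or.inr ⟨hx, h⟩)
    simp only [Bool.not_eq_true', PySem.Set.empty] at hin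
    simp [hin]

-- ===== VERDICT (by name: the statement is the Claim_ definition above) =====
theorem split_mode_spec : Claim_equal_split_mode := by
  intro mode _
  unfold Spec_split_mode split_mode split_mode_alt AA_OTHER_REMOVE
  dsimp only
  rw [pairFold (fun i => PySem.Str.isIn "::" i) (fun i => PySem.Str.slice i (some 2) none),
    diff_eq_filter (fun i => PySem.Str.isIn "::" i),
    AAfold_filter (fun i => PySem.Str.isIn "::" i) (fun i => PySem.Str.slice i (some 2) none)]
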